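-- pv_equiv track=rewrite | github.com/Molecular-Biophysics-Database/mbdb-search | src/data/prettier_names.py | remove_if_equal
-- ===== SOURCE A (Python) =====
-- from typing import List, Dict
--
-- def remove_if_equal(field_paths) -> Dict[str, str]:
--     # aligns the paths and remove all the elements
--     # they have in common e.g. (a.b.foo, a.b.bar) becomes (foo, bar)
--     split_paths = [field_path.split('.') for field_path in field_paths]
--     while True:
--         try:
--             unique_elements = {path[0] for path in split_paths}
--         except IndexError:
--             # we ran out of elements without finding a difference
--             raise ValueError("duplicate field paths found, they should be unique")
--
--         # more than one element so the paths must differ at this point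
--         if len(unique_elements) != 1:
--             break
--
--         # all elements are the same, so they can be removed
--         for path in split_paths:
--             path.pop(0)
--
--     return {field_path: ".".join(split_path) for field_path, split_path in zip(field_paths, split_paths)}
-- ===== SOURCE B (Python) =====
-- def _cp(a, b):
--     # longest common prefix of two lists
--     out = []
--     for x, y in zip(a, b):
--         if x != y:
--             break
--         out.append(x)
--     return out
--
--
-- def remove_if_equal(field_paths):
--     split_paths = [fp.split('.') for fp in field_paths]
--     if not split_paths:
--         return {}
--     common = split_paths[0]
--     for p in split_paths[1:]:
--         common = _cp(common, p)
--     k = len(common)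
--     if any(len(p) == k for p in split_paths):
--         raise ValueError("duplicate field paths found, they should be unique")
--     return {fp: ".".join(p[k:]) for fp, p in zip(field_paths, split_paths)}
-- ===== Notes on version B (the rewrite author's own statement) =====
-- stated objective: alternative
-- what changed: Instead of A's while-loop that repeatedly builds a set of first components and pops the front of every split path, B computes the longest common component prefix once by folding a pairwise common-prefix function over the split paths and slices each path a single time; it trades A's column-by-column stripping for a single fold, at similar measured cost.
import Mathlib
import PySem

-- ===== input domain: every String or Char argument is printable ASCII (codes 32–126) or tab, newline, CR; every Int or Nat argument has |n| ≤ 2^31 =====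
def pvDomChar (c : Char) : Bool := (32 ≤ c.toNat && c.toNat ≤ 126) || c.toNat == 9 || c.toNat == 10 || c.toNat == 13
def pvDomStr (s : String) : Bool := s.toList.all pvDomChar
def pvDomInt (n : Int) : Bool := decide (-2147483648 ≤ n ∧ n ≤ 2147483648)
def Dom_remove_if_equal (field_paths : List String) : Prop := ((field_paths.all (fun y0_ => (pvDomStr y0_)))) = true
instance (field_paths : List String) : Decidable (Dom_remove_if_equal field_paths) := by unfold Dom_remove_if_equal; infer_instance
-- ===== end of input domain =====

-- B strips the shared leading dot-components with one longest-common-prefix fold and one slice per path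
-- instead of A's repeated pop-a-column-and-rebuild-a-set loop (objective: alternative algorithm).

-- ===== PORT A =====
-- fp.split('.'): the separator is the literal ".", never empty, so PySem.Str.split? is always `some`
def pvSplitDot (fp : String) : List String := (PySem.Str.split? fp ".").getD []

-- `{path[0] for path in split_paths}`: none = IndexError (some path is empty)
def pvHeadsA : List (List String) → Option (List String)
  | [] => some []
  | [] :: _ => none
  | (h :: _) :: rest => (pvHeadsA rest).map (h :: ·)

-- the `while True` loop; fuel bounds the iterations (each one pops a column), none = the IndexError path
def pvLoopA : Nat → List (List String) → Option (List (List String))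
  | 0, _ => none
  | fuel + 1, ss =>
    match pvHeadsA ss with
    | none => none
    | some hs =>
      if PySem.Set.len (PySem.Set.ofList hs) ≠ 1 then some ss
      else pvLoopA fuel (ss.map List.tail)

def remove_if_equal (field_paths : List String) : List (String × String) :=
  let split_paths := field_paths.map (fun fp => pvSplitDot fp)
  match pvLoopA ((split_paths.map List.length).sum + 1) split_paths with
  | none => []  -- Python raises ValueError here; excluded by Pre_
  | some ss =>
    ((field_paths.zip ss).foldl
      (fun d p => d.insert p.1 (PySem.Str.join "." p.2)) PySem.Dict.empty).items

-- ===== PORT B =====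
-- _cp: longest common prefix of two lists (the zip/break loop of Source B)
def pvCp : List String → List String → List String
  | x :: xs, y :: ys => if x = y then x :: pvCp xs ys else []
  | _, _ => []

def remove_if_equal_alt (field_paths : List String) : List (String × String) :=
  let split_paths := field_paths.map (fun fp => pvSplitDot fp)
  match split_paths with
  | [] => []
  | h :: t =>
    let k := (t.foldl pvCp h).length
    if split_paths.any (fun p => p.length = k) then []  -- Python raises ValueError here; excluded by Pre_
    else
      ((field_paths.zip split_paths).foldl
        (fun d p => d.insert p.1 (PySem.Str.join "." (p.2.drop k))) PySem.Dict.empty).items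

-- ===== PRECONDITION & SPEC =====
-- Pre_ excludes exactly the inputs on which A raises ValueError: those where some path's
-- dot-components are a prefix of every path's components (e.g. duplicates, or ["a", "a.b"]).
def Pre_remove_if_equal (field_paths : List String) : Prop :=
  ¬ ∃ p ∈ field_paths.map (fun fp => pvSplitDot fp),
      ∀ q ∈ field_paths.map (fun fp => pvSplitDot fp), p <+: q
instance (field_paths : List String) : Decidable (Pre_remove_if_equal field_paths) := by
  unfold Pre_remove_if_equal; infer_instance

def pvWitness_remove_if_equal : List String := ["a.b.foo", "a.b.bar"]

def Spec_remove_if_equal (field_paths : List String) (out : List (String × String)) : Prop := out = remove_if_equal_alt field_paths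
instance (field_paths : List String) (out : List (String × String)) : Decidable (Spec_remove_if_equal field_paths out) := by unfold Spec_remove_if_equal; infer_instance

-- ===== CLAIM (what is proved, stated in full; the proofs are below) =====
def Claim_equal_remove_if_equal : Prop := ∀ (field_paths : List String), Dom_remove_if_equal field_paths → Pre_remove_if_equal field_paths → Spec_remove_if_equal field_paths (remove_if_equal field_paths)

-- ===== LEMMAS AND PROOFS =====

theorem pvCp_prefix_left : ∀ a b : List String, pvCp a b <+: a := by
  intro a
  induction a with
  | nil => intro b; cases b <;> simp [pvCp]
  | cons x xs ih =>
    intro b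
    cases b with
    | nil => simp [pvCp]
    | cons y ys =>
      simp only [pvCp]
      split
      · exact (List.cons_prefix_cons).mpr ⟨rfl, ih ys⟩
      · simp

theorem pvCp_prefix_right : ∀ a b : List String, pvCp a b <+: b := by
  intro a
  induction a with
  | nil => intro b; cases b <;> simp [pvCp]
  | cons x xs ih =>
    intro b
    cases b with
    | nil => simp [pvCp]
    | cons y ys =>
      simp only [pvCp]
      split
      · rename_i h; subst h; exact (List.cons_prefix_cons).mpr ⟨rfl, ih ys⟩
      · simp

theorem prefix_pvCp : ∀ {c a b : List String}, c <+: a → c <+: b → c <+: pvCp a b := by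
  intro c
  induction c with
  | nil => intro a b _ _; simp
  | cons x xs ih =>
    intro a b ha hb
    obtain ⟨ra, rfl⟩ := ha
    obtain ⟨rb, hb'⟩ := hb
    cases b with
    | nil => simp at hb'
    | cons y ys =>
      simp only [List.cons_append, List.cons.injEq] at hb'
      obtain ⟨rfl, hys⟩ := hb'
      simp only [List.cons_append]
      simp only [pvCp]
      exact (List.cons_prefix_cons).mpr ⟨rfl, ih ⟨ra, rfl⟩ ⟨rb, hys⟩⟩

theorem foldl_pvCp_prefix (t : List (List String)) :
    ∀ h : List String, (t.foldl pvCp h <+: h) ∧ ∀ q ∈ t, t.foldl pvCp h <+: q := by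
  induction t with
  | nil => intro h; simp
  | cons p t ih =>
    intro h
    simp only [List.foldl_cons]
    obtain ⟨h1, h2⟩ := ih (pvCp h p)
    refine ⟨h1.trans (pvCp_prefix_left h p), ?_⟩
    intro q hq
    rcases List.mem_cons.mp hq with rfl | hq
    · exact h1.trans (pvCp_prefix_right h q)
    · exact h2 q hq

theorem prefix_foldl_pvCp (t : List (List String)) :
    ∀ (h c : List String), c <+: h → (∀ q ∈ t, c <+: q) → c <+: t.foldl pvCp h := by
  induction t with
  | nil => intro h c hc _; simpa using hc
  | cons p t ih =>
    intro h c hc hq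
    simp only [List.foldl_cons]
    exact ih _ c (prefix_pvCp hc (hq p (List.mem_cons_self))) (fun q hqt => hq q (List.mem_cons_of_mem p hqt))

-- heads of a list of nonempty lists
theorem pvHeadsA_eq (ss : List (List String)) (h : ∀ q ∈ ss, q ≠ []) :
    pvHeadsA ss = some (ss.map (fun q => q.headD "")) := by
  induction ss with
  | nil => rfl
  | cons p rest ih =>
    cases p with
    | nil => exact absurd rfl (h [] List.mem_cons_self)
    | cons x xs =>
      simp only [pvHeadsA, List.map_cons, List.headD_cons]
      rw [ih (fun q hq => h q (List.mem_cons_of_mem _ hq))]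
      rfl

theorem ofList_all_eq {α : Type} [BEq α] [LawfulBEq α] (x : α) :
    ∀ hs : List α, hs ≠ [] → (∀ y ∈ hs, y = x) → PySem.Set.ofList hs = [x] := by
  intro hs
  induction hs with
  | nil => intro h; exact absurd rfl h
  | cons a rest ih =>
    intro _ hall
    have ha : a = x := hall a List.mem_cons_self
    subst ha
    rw [PySem.Set.ofList_cons]
    cases rest with
    | nil => rfl
    | cons b rest' =>
      rw [ih (by simp) (fun y hy => hall y (List.mem_cons_of_mem _ hy))]
      simp [PySem.Set.discard]

theorem len_ofList_eq_one {α : Type} [BEq α] [LawfulBEq α] (hs : List α)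
    (h : PySem.Set.len (PySem.Set.ofList hs) = 1) : ∃ x, ∀ y ∈ hs, y = x := by
  have hl : (PySem.Set.ofList hs).length = 1 := by simpa [PySem.Set.len] using h
  obtain ⟨x, hx⟩ := List.length_eq_one_iff.mp hl
  refine ⟨x, fun y hy => ?_⟩
  have : y ∈ PySem.Set.ofList hs := (PySem.Set.mem_ofList _ _).mpr hy
  rw [hx] at this
  simpa using this

-- the main loop characterisation: if c is a common prefix of all paths, strictly shorter than each,
-- and the paths do not all agree at column c.length, the loop strips exactly c
theorem pvLoopA_drop :
    ∀ (c : List String) (ss : List (List String)) (fuel : Nat),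
      c.length < fuel →
      ss ≠ [] →
      (∀ q ∈ ss, c <+: q) →
      (∀ q ∈ ss, c.length < q.length) →
      (¬ ∃ x, ∀ q ∈ ss, (q.drop c.length).headD "" = x) →
      pvLoopA fuel ss = some (ss.map (fun q => q.drop c.length)) := by
  intro c
  induction c with
  | nil =>
    intro ss fuel hfuel hne _ hlt hstop
    cases fuel with
    | zero => omega
    | succ fuel =>
      have hnil : ∀ q ∈ ss, q ≠ [] := fun q hq => List.ne_nil_of_length_pos (hlt q hq)
      simp only [pvLoopA, pvHeadsA_eq ss hnil]
      have hne1 : PySem.Set.len (PySem.Set.ofList (ss.map (fun q => q.headD ""))) ≠ 1 := by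
        intro h1
        obtain ⟨x, hx⟩ := len_ofList_eq_one _ h1
        exact hstop ⟨x, fun q hq => by
          simpa using hx (q.headD "") (List.mem_map_of_mem hq)⟩
      rw [if_pos hne1]
      simp
  | cons x c ih =>
    intro ss fuel hfuel hne hpre hlt hstop
    cases fuel with
    | zero => simp at hfuel
    | succ fuel =>
      have hnil : ∀ q ∈ ss, q ≠ [] := fun q hq => List.ne_nil_of_length_pos (by
        have := hlt q hq; simp at this ⊢; omega)
      simp only [pvLoopA, pvHeadsA_eq ss hnil]
      -- every head is x
      have hhead : ∀ q ∈ ss, q.headD "" = x := by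
        intro q hq
        obtain ⟨r, hr⟩ := hpre q hq
        rw [← hr]; rfl
      have hofl : PySem.Set.ofList (ss.map (fun q => q.headD "")) = [x] := by
        apply ofList_all_eq
        · simpa using hne
        · intro y hy
          obtain ⟨q, hq, rfl⟩ := List.mem_map.mp hy
          exact hhead q hq
      rw [hofl]
      rw [if_neg (by simp [PySem.Set.len])]
      -- tail facts
      have htails : ∀ q ∈ ss, ∃ q', q = x :: q' := by
        intro q hq
        obtain ⟨r, hr⟩ := hpre q hq
        exact ⟨c ++ r, by rw [← hr]; rfl⟩
      have hrec := ih (ss.map List.tail) fuel (by simpa using Nat.lt_of_succ_lt_succ hfuel)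
        (by simpa using hne)
        (by
          intro q hq
          obtain ⟨q0, hq0, rfl⟩ := List.mem_map.mp hq
          obtain ⟨q', rfl⟩ := htails q0 hq0
          obtain ⟨r, hr⟩ := hpre _ hq0
          simp only [List.cons_append, List.cons.injEq] at hr
          exact ⟨r, hr.2⟩)
        (by
          intro q hq
          obtain ⟨q0, hq0, rfl⟩ := List.mem_map.mp hq
          obtain ⟨q', rfl⟩ := htails q0 hq0
          have := hlt _ hq0
          simp at this ⊢; omega)
        (by
          intro ⟨y, hy⟩
          refine hstop ⟨y, fun q hq => ?_⟩
          obtain ⟨q', rfl⟩ := htails q hq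
          have := hy q' (List.mem_map.mpr ⟨x :: q', hq, rfl⟩)
          simpa using this)
      rw [hrec]
      congr 1
      rw [List.map_map]
      apply List.map_congr_left
      intro q hq
      obtain ⟨q', rfl⟩ := htails q hq
      simp

-- ===== VERDICT (by name: the statement is the Claim_ definition above) =====
theorem remove_if_equal_spec : Claim_equal_remove_if_equal := by
  intro fps _ hpre
  unfold Spec_remove_if_equal remove_if_equal remove_if_equal_alt
  cases hfps : fps.map (fun fp => pvSplitDot fp) with
  | nil =>
    have : fps = [] := by
      cases fps with
      | nil => rfl
      | cons a l => simp at hfps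
    subst this
    rfl
  | cons h t =>
    unfold Pre_remove_if_equal at hpre
    rw [hfps] at hpre
    -- (t.foldl pvCp h) is the longest common prefix of the split paths
    have hcp : ∀ q ∈ h :: t, t.foldl pvCp h <+: q := by
      obtain ⟨h1, h2⟩ := foldl_pvCp_prefix t h
      intro q hq
      rcases List.mem_cons.mp hq with rfl | hq
      · exact h1
      · exact h2 q hq
    have hlt : ∀ q ∈ h :: t, (t.foldl pvCp h).length < q.length := by
      intro q hq
      have hle := (hcp q hq).length_le
      rcases lt_or_eq_of_le hle with hl | hl
      · exact hl
      · exfalso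
        have hqc : q = t.foldl pvCp h := ((hcp q hq).eq_of_length_le (le_of_eq hl.symm)).symm
        exact hpre ⟨q, hq, fun q' hq' => hqc ▸ hcp q' hq'⟩
    have hstop : ¬ ∃ x, ∀ q ∈ h :: t, (q.drop (t.foldl pvCp h).length).headD "" = x := by
      intro ⟨x, hx⟩
      -- then (t.foldl pvCp h) ++ [x] would be a longer common prefix
      have hext : ∀ q ∈ h :: t, t.foldl pvCp h ++ [x] <+: q := by
        intro q hq
        obtain ⟨r, hr⟩ := hcp q hq
        have hrne : r ≠ [] := by
          have := hlt q hq
          rw [← hr] at this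
          simp at this
          exact List.ne_nil_of_length_pos this
        obtain ⟨y, r', rfl⟩ := List.exists_cons_of_ne_nil hrne
        have hy : y = x := by
          have := hx q hq
          rw [← hr] at this
          simpa using this
        subst hy
        exact ⟨r', by rw [← hr]; simp⟩
      have hpp : t.foldl pvCp h ++ [x] <+: t.foldl pvCp h :=
        prefix_foldl_pvCp t h _ (hext h List.mem_cons_self)
          (fun q hq => hext q (List.mem_cons_of_mem h hq))
      have := hpp.length_le
      simp at this
    have hloop := pvLoopA_drop (t.foldl pvCp h) (h :: t)
      (((h :: t).map List.length).sum + 1)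
      (by
        have := hlt h List.mem_cons_self
        simp only [List.map_cons, List.sum_cons]
        omega)
      (by simp) hcp hlt hstop
    have hany : ((h :: t).any (fun p => decide (p.length = (t.foldl pvCp h).length))) = false := by
      rw [List.any_eq_false]
      intro p hp
      have := hlt p hp
      simp only [decide_eq_true_eq]
      omega
    simp only [hloop, hany, Bool.false_eq_true, if_false]
    rw [List.zip_map_right, List.foldl_map]
    simp [Prod.map]
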